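-- pv_equiv track=rewrite | github.com/KingHaim/physio-app | app/routes/api.py | anonymize_occupation
-- ===== SOURCE A (Python) =====
-- def anonymize_occupation(occupation):
--     """Convert specific occupations to general categories"""
--     if not occupation:
--         return "Not specified"
--
--     occupation_lower = occupation.lower()
--
--     # Desk/office work
--     if any(word in occupation_lower for word in ['office', 'desk', 'computer', 'admin', 'manager', 'accountant', 'lawyer', 'engineer']):
--         return "Desk/office work"
--
--     # Physical labor
--     elif any(word in occupation_lower for word in ['construction', 'mechanic', 'factory', 'warehouse', 'delivery', 'manual', 'laborer']):
--         return "Physical labor"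
--
--     # Healthcare
--     elif any(word in occupation_lower for word in ['nurse', 'doctor', 'healthcare', 'medical', 'physio', 'therapist']):
--         return "Healthcare worker"
--
--     # Education
--     elif any(word in occupation_lower for word in ['teacher', 'professor', 'education', 'school']):
--         return "Education sector"
--
--     # Service industry
--     elif any(word in occupation_lower for word in ['waiter', 'retail', 'customer', 'service', 'sales', 'chef', 'cook']):
--         return "Service industry"
--
--     # Driving/transport
--     elif any(word in occupation_lower for word in ['driver', 'transport', 'taxi', 'truck', 'delivery']):
--         return "Transportation"
--
--     # Retired
--     elif any(word in occupation_lower for word in ['retired', 'pension']):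
--         return "Retired"
--
--     # Student
--     elif any(word in occupation_lower for word in ['student', 'university', 'college']):
--         return "Student"
--
--     else:
--         return "Other profession"
-- ===== SOURCE B (Python) =====
-- # Text-driven scan: walk the string position by position, match keywords as
-- # prefixes at each offset, and keep the minimum category rank seen.
-- KEYWORD_RANK = {
--     'office': 0, 'desk': 0, 'computer': 0, 'admin': 0, 'manager': 0,
--     'accountant': 0, 'lawyer': 0, 'engineer': 0,
--     'construction': 1, 'mechanic': 1, 'factory': 1, 'warehouse': 1,
--     'delivery': 1, 'manual': 1, 'laborer': 1,
--     'nurse': 2, 'doctor': 2, 'healthcare': 2, 'medical': 2, 'physio': 2,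
--     'therapist': 2,
--     'teacher': 3, 'professor': 3, 'education': 3, 'school': 3,
--     'waiter': 4, 'retail': 4, 'customer': 4, 'service': 4, 'sales': 4,
--     'chef': 4, 'cook': 4,
--     'driver': 5, 'transport': 5, 'taxi': 5, 'truck': 5,
--     'retired': 6, 'pension': 6,
--     'student': 7, 'university': 7, 'college': 7,
-- }
--
-- CATEGORIES = [
--     "Desk/office work", "Physical labor", "Healthcare worker",
--     "Education sector", "Service industry", "Transportation",
--     "Retired", "Student", "Other profession",
-- ]
--
--
-- def _best_rank(low):
--     best = 8
--     for i in range(len(low)):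
--         for word, rank in KEYWORD_RANK.items():
--             if low.startswith(word, i) and rank < best:
--                 best = rank
--     return best
--
--
-- def anonymize_occupation(occupation):
--     """Convert specific occupations to general categories"""
--     if not occupation:
--         return "Not specified"
--     return CATEGORIES[_best_rank(occupation.lower())]
-- ===== Notes on version B (the rewrite author's own statement) =====
-- stated objective: alternative
-- what changed: Instead of testing eight keyword groups with substring containment in branch order, B walks the lowercased text position by position, matches each keyword as a prefix at each offset, and accumulates the minimum category rank, finally indexing a category array (the rank-8 default is 'Other profession').
import Mathlib
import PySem

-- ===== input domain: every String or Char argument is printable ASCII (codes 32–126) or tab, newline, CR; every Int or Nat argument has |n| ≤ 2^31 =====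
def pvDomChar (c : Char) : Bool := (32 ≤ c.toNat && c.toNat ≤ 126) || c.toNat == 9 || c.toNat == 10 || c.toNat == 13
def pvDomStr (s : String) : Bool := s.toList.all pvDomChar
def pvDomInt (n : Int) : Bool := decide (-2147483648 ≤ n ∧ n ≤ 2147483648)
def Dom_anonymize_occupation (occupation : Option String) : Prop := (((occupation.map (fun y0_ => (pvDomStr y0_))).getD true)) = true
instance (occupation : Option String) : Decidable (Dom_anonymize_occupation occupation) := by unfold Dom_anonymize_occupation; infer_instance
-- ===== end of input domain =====

-- B scans the text position by position, matching keywords as prefixes and keeping the minimum category rank, instead of A's per-group substring-containment branch chain: an alternative, text-driven algorithm.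


-- ===== PORT A =====
def anonymize_occupation (occupation : Option String) : String :=
  match occupation with
  | none => "Not specified"
  | some occ =>
    if occ = "" then "Not specified"
    else
      let occupation_lower := PySem.Str.lower occ
      if (["office", "desk", "computer", "admin", "manager", "accountant", "lawyer", "engineer"].any
            (fun word => PySem.Str.isIn word occupation_lower)) then "Desk/office work"
      else if (["construction", "mechanic", "factory", "warehouse", "delivery", "manual", "laborer"].any
            (fun word => PySem.Str.isIn word occupation_lower)) then "Physical labor"
      else if (["nurse", "doctor", "healthcare", "medical", "physio", "therapist"].any
            (fun word => PySem.Str.isIn word occupation_lower)) then "Healthcare worker"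
      else if (["teacher", "professor", "education", "school"].any
            (fun word => PySem.Str.isIn word occupation_lower)) then "Education sector"
      else if (["waiter", "retail", "customer", "service", "sales", "chef", "cook"].any
            (fun word => PySem.Str.isIn word occupation_lower)) then "Service industry"
      else if (["driver", "transport", "taxi", "truck", "delivery"].any
            (fun word => PySem.Str.isIn word occupation_lower)) then "Transportation"
      else if (["retired", "pension"].any
            (fun word => PySem.Str.isIn word occupation_lower)) then "Retired"
      else if (["student", "university", "college"].any
            (fun word => PySem.Str.isIn word occupation_lower)) then "Student"
      else "Other profession"

-- ===== PORT B =====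
-- KEYWORD_RANK.items() in insertion order (dict keyword -> category rank)
def KEYWORD_RANK : List (String × Nat) :=
  [("office", 0), ("desk", 0), ("computer", 0), ("admin", 0), ("manager", 0),
   ("accountant", 0), ("lawyer", 0), ("engineer", 0),
   ("construction", 1), ("mechanic", 1), ("factory", 1), ("warehouse", 1),
   ("delivery", 1), ("manual", 1), ("laborer", 1),
   ("nurse", 2), ("doctor", 2), ("healthcare", 2), ("medical", 2), ("physio", 2),
   ("therapist", 2),
   ("teacher", 3), ("professor", 3), ("education", 3), ("school", 3),
   ("waiter", 4), ("retail", 4), ("customer", 4), ("service", 4), ("sales", 4),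
   ("chef", 4), ("cook", 4),
   ("driver", 5), ("transport", 5), ("taxi", 5), ("truck", 5),
   ("retired", 6), ("pension", 6),
   ("student", 7), ("university", 7), ("college", 7)]

def CATEGORIES : List String :=
  ["Desk/office work", "Physical labor", "Healthcare worker",
   "Education sector", "Service industry", "Transportation",
   "Retired", "Student", "Other profession"]

-- _best_rank(low): for i in range(len(low)): for word, rank in KEYWORD_RANK.items(): …
-- low.startswith(word, i) is ported as Chars.startswith on (low.drop i.toNat): exact since every i drawn from range(len(low)) is ≥ 0.
def bestRank (low : List Char) : Nat :=
  (PySem.List.pyRange 0 (low.length : Int) 1).foldl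
    (fun best i =>
      KEYWORD_RANK.foldl
        (fun best p =>
          if PySem.Chars.startswith (low.drop i.toNat) p.1.toList && decide (p.2 < best)
          then p.2 else best)
        best)
    8

def anonymize_occupation_alt (occupation : Option String) : String :=
  match occupation with
  | none => "Not specified"
  | some occ =>
    if occ = "" then "Not specified"
    else ((CATEGORIES[bestRank (PySem.Str.lower occ).toList]?).getD "")

-- ===== PRECONDITION & SPEC =====
def Spec_anonymize_occupation (occupation : Option String) (out : String) : Prop := out = anonymize_occupation_alt occupation
instance (occupation : Option String) (out : String) : Decidable (Spec_anonymize_occupation occupation out) := by unfold Spec_anonymize_occupation; infer_instance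

-- ===== CLAIM (what is proved, stated in full; the proofs are below) =====
def Claim_equal_anonymize_occupation : Prop := ∀ (occupation : Option String), Dom_anonymize_occupation occupation → Spec_anonymize_occupation occupation (anonymize_occupation occupation)

-- ===== LEMMAS AND PROOFS =====

-- characterization of the inner running-min fold
theorem innerFold_char {α : Type} (l : List α) (c : α → Bool) (rk : α → Nat) (b : Nat) :
    (l.foldl (fun b x => if c x && decide (rk x < b) then rk x else b) b = b ∨
      ∃ x ∈ l, c x = true ∧ l.foldl (fun b x => if c x && decide (rk x < b) then rk x else b) b = rk x) ∧
    l.foldl (fun b x => if c x && decide (rk x < b) then rk x else b) b ≤ b ∧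
    (∀ x ∈ l, c x = true → l.foldl (fun b x => if c x && decide (rk x < b) then rk x else b) b ≤ rk x) := by
  induction l generalizing b with
  | nil => simp
  | cons a t ih =>
    simp only [List.foldl_cons, List.mem_cons]
    obtain ⟨ih1, ih2, ih3⟩ := ih (if c a && decide (rk a < b) then rk a else b)
    refine ⟨?_, ?_, ?_⟩
    · rcases ih1 with h | ⟨x, hx, hcx, hr⟩
      · rw [h]
        by_cases hca : c a = true
        · by_cases hlt : rk a < b
          · exact Or.inr ⟨a, Or.inl rfl, hca, by simp [hca, hlt]⟩
          · simp [hca, hlt]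
        · simp [hca]
      · exact Or.inr ⟨x, Or.inr hx, hcx, hr⟩
    · refine le_trans ih2 ?_
      split_ifs with h
      · simp only [Bool.and_eq_true, decide_eq_true_eq] at h
        omega
      · exact le_refl b
    · rintro x (rfl | hx) hcx
      · refine le_trans ih2 ?_
        simp only [hcx, Bool.true_and]
        split_ifs with h <;> simp_all
      · exact ih3 x hx hcx

-- characterization of the double fold (outer loop over the scan positions)
theorem outerFold_char {α : Type} (is : List Int) (l : List α) (c : Int → α → Bool)
    (rk : α → Nat) (b : Nat) :
    (is.foldl (fun b i => l.foldl (fun b x => if c i x && decide (rk x < b) then rk x else b) b) b = b ∨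
      ∃ i ∈ is, ∃ x ∈ l, c i x = true ∧
        is.foldl (fun b i => l.foldl (fun b x => if c i x && decide (rk x < b) then rk x else b) b) b = rk x) ∧
    is.foldl (fun b i => l.foldl (fun b x => if c i x && decide (rk x < b) then rk x else b) b) b ≤ b ∧
    (∀ i ∈ is, ∀ x ∈ l, c i x = true →
      is.foldl (fun b i => l.foldl (fun b x => if c i x && decide (rk x < b) then rk x else b) b) b ≤ rk x) := by
  induction is generalizing b with
  | nil => simp
  | cons j t ih =>
    simp only [List.foldl_cons, List.mem_cons]
    obtain ⟨in1, in2, in3⟩ := innerFold_char l (c j) rk b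
    obtain ⟨ih1, ih2, ih3⟩ := ih (l.foldl (fun b x => if c j x && decide (rk x < b) then rk x else b) b)
    refine ⟨?_, le_trans ih2 in2, ?_⟩
    · rcases ih1 with h | ⟨i, hi, x, hx, hcx, hr⟩
      · rw [h]
        rcases in1 with h' | ⟨x, hx, hcx, hr⟩
        · exact Or.inl h'
        · exact Or.inr ⟨j, Or.inl rfl, x, hx, hcx, hr⟩
      · exact Or.inr ⟨i, Or.inr hi, x, hx, hcx, hr⟩
    · rintro i (rfl | hi) x hx hcx
      · exact le_trans ih2 (in3 x hx hcx)
      · exact ih3 i hi x hx hcx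

-- a nonempty keyword occurs in the text iff it is a prefix at some scanned position
theorem matched_iff (L : List Char) (w : List Char) (hw : w ≠ []) :
    (∃ i ∈ PySem.List.pyRange 0 (L.length : Int) 1, PySem.Chars.startswith (L.drop i.toNat) w = true)
      ↔ PySem.Chars.isIn w L = true := by
  rw [← PySem.Chars.exists_prefix_drop_iff_isIn]
  constructor
  · rintro ⟨i, _, hsw⟩
    exact ⟨i.toNat, (PySem.Chars.startswith_iff _ _).mp hsw⟩
  · rintro ⟨j, hj⟩
    have hjlt : j < L.length := by
      by_contra h
      have hnil : L.drop j = [] := List.drop_eq_nil_of_le (by omega)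
      rw [hnil] at hj
      exact hw (List.prefix_nil.mp hj)
    refine ⟨(j : Int), ?_, ?_⟩
    · rw [PySem.List.mem_pyRange_one]
      exact ⟨Int.natCast_nonneg j, by exact_mod_cast hjlt⟩
    · rw [Int.toNat_natCast]
      exact (PySem.Chars.startswith_iff _ _).mpr hj

-- pin the value of bestRank from what is (not) contained in the text
theorem bestRank_eq (occ : String) (k : Nat) (hk : k ≤ 8)
    (hlow : ∀ p ∈ KEYWORD_RANK, p.2 < k → PySem.Str.isIn p.1 (PySem.Str.lower occ) = false)
    (hup : k = 8 ∨ ∃ p ∈ KEYWORD_RANK, p.2 = k ∧ PySem.Str.isIn p.1 (PySem.Str.lower occ) = true) :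
    bestRank (PySem.Str.lower occ).toList = k := by
  set L := (PySem.Str.lower occ).toList with hL
  have hbridge : ∀ w : String, PySem.Str.isIn w (PySem.Str.lower occ) = PySem.Chars.isIn w.toList L := by
    intro w
    rw [PySem.Str.isIn_eq]
  obtain ⟨h1, h2, h3⟩ := outerFold_char (PySem.List.pyRange 0 (L.length : Int) 1)
    KEYWORD_RANK (fun i p => PySem.Chars.startswith (L.drop i.toNat) p.1.toList) Prod.snd 8
  have hupper : k = 8 ∨ bestRank L ≤ k := by
    rcases hup with rfl | ⟨p, hp, hpk, hin⟩
    · exact Or.inl rfl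
    · rw [hbridge] at hin
      have hw : p.1.toList ≠ [] := by fin_cases hp <;> decide
      obtain ⟨i, hi, hsw⟩ := (matched_iff L p.1.toList hw).mpr hin
      exact Or.inr (hpk ▸ h3 i hi p hp hsw)
  have hlower : bestRank L = 8 ∨ k ≤ (bestRank L : Nat) := by
    rcases h1 with h | ⟨i, hi, p, hp, hcx, hr⟩
    · exact Or.inl h
    · have hw : p.1.toList ≠ [] := by fin_cases hp <;> decide
      have hin : PySem.Chars.isIn p.1.toList L = true :=
        (matched_iff L p.1.toList hw).mp ⟨i, hi, hcx⟩
      by_cases hplt : p.2 < k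
      · have := hlow p hp hplt
        rw [hbridge, hin] at this
        exact absurd this (by decide)
      · exact Or.inr (by rw [bestRank, hr] at *; omega)
  have hle8 : bestRank L ≤ 8 := h2
  rcases hupper with rfl | hu
  · omega
  · omega

-- a group that A found no keyword of contains no text keyword of its rank
theorem group_false (low : String) (ws : List String) (j : Nat)
    (h : (ws.any (fun word => PySem.Str.isIn word low)) = false)
    (hcover : ∀ p ∈ KEYWORD_RANK, p.2 = j → p.1 ∈ ws) :
    ∀ p ∈ KEYWORD_RANK, p.2 = j → PySem.Str.isIn p.1 low = false := by
  intro p hp hj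
  have := List.any_eq_false.mp h p.1 (hcover p hp hj)
  simpa using this

-- ===== VERDICT (by name: the statement is the Claim_ definition above) =====
theorem anonymize_occupation_spec : Claim_equal_anonymize_occupation := by
  intro occupation _
  unfold Spec_anonymize_occupation
  cases occupation with
  | none => rfl
  | some occ =>
    by_cases hempty : occ = ""
    · simp [anonymize_occupation, anonymize_occupation_alt, hempty]
    · simp only [anonymize_occupation, anonymize_occupation_alt, if_neg hempty]
      split_ifs with h0 h1 h2 h3 h4 h5 h6 h7
      · -- Desk/office work
        have hv := bestRank_eq occ 0 (by omega)
          (by intro p hp hlt; omega)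
          (by obtain ⟨w, hw, hin⟩ := List.any_eq_true.mp h0
              exact Or.inr ⟨(w, 0), by fin_cases hw <;> decide, rfl, hin⟩)
        rw [hv]; rfl
      · -- Physical labor
        have f0 := group_false (PySem.Str.lower occ) _ 0 (Bool.eq_false_iff.mpr h0) (by decide)
        have hv := bestRank_eq occ 1 (by omega)
          (by intro p hp hlt
              have : p.2 = 0 := by omega
              exact f0 p hp this)
          (by obtain ⟨w, hw, hin⟩ := List.any_eq_true.mp h1
              exact Or.inr ⟨(w, 1), by fin_cases hw <;> decide, rfl, hin⟩)
        rw [hv]; rfl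
      · -- Healthcare worker
        have f0 := group_false (PySem.Str.lower occ) _ 0 (Bool.eq_false_iff.mpr h0) (by decide)
        have f1 := group_false (PySem.Str.lower occ) _ 1 (Bool.eq_false_iff.mpr h1) (by decide)
        have hv := bestRank_eq occ 2 (by omega)
          (by intro p hp hlt
              have : p.2 = 0 ∨ p.2 = 1 := by omega
              rcases this with h | h
              exacts [f0 p hp h, f1 p hp h])
          (by obtain ⟨w, hw, hin⟩ := List.any_eq_true.mp h2
              exact Or.inr ⟨(w, 2), by fin_cases hw <;> decide, rfl, hin⟩)
        rw [hv]; rfl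
      · -- Education sector
        have f0 := group_false (PySem.Str.lower occ) _ 0 (Bool.eq_false_iff.mpr h0) (by decide)
        have f1 := group_false (PySem.Str.lower occ) _ 1 (Bool.eq_false_iff.mpr h1) (by decide)
        have f2 := group_false (PySem.Str.lower occ) _ 2 (Bool.eq_false_iff.mpr h2) (by decide)
        have hv := bestRank_eq occ 3 (by omega)
          (by intro p hp hlt
              have : p.2 = 0 ∨ p.2 = 1 ∨ p.2 = 2 := by omega
              rcases this with h | h | h
              exacts [f0 p hp h, f1 p hp h, f2 p hp h])
          (by obtain ⟨w, hw, hin⟩ := List.any_eq_true.mp h3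
              exact Or.inr ⟨(w, 3), by fin_cases hw <;> decide, rfl, hin⟩)
        rw [hv]; rfl
      · -- Service industry
        have f0 := group_false (PySem.Str.lower occ) _ 0 (Bool.eq_false_iff.mpr h0) (by decide)
        have f1 := group_false (PySem.Str.lower occ) _ 1 (Bool.eq_false_iff.mpr h1) (by decide)
        have f2 := group_false (PySem.Str.lower occ) _ 2 (Bool.eq_false_iff.mpr h2) (by decide)
        have f3 := group_false (PySem.Str.lower occ) _ 3 (Bool.eq_false_iff.mpr h3) (by decide)
        have hv := bestRank_eq occ 4 (by omega)
          (by intro p hp hlt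
              have : p.2 = 0 ∨ p.2 = 1 ∨ p.2 = 2 ∨ p.2 = 3 := by omega
              rcases this with h | h | h | h
              exacts [f0 p hp h, f1 p hp h, f2 p hp h, f3 p hp h])
          (by obtain ⟨w, hw, hin⟩ := List.any_eq_true.mp h4
              exact Or.inr ⟨(w, 4), by fin_cases hw <;> decide, rfl, hin⟩)
        rw [hv]; rfl
      · -- Transportation ('delivery' in A's group 5 already belongs to rank 1, excluded here by f1)
        have f0 := group_false (PySem.Str.lower occ) _ 0 (Bool.eq_false_iff.mpr h0) (by decide)
        have f1 := group_false (PySem.Str.lower occ) _ 1 (Bool.eq_false_iff.mpr h1) (by decide)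
        have f2 := group_false (PySem.Str.lower occ) _ 2 (Bool.eq_false_iff.mpr h2) (by decide)
        have f3 := group_false (PySem.Str.lower occ) _ 3 (Bool.eq_false_iff.mpr h3) (by decide)
        have f4 := group_false (PySem.Str.lower occ) _ 4 (Bool.eq_false_iff.mpr h4) (by decide)
        have hv := bestRank_eq occ 5 (by omega)
          (by intro p hp hlt
              have : p.2 = 0 ∨ p.2 = 1 ∨ p.2 = 2 ∨ p.2 = 3 ∨ p.2 = 4 := by omega
              rcases this with h | h | h | h | h
              exacts [f0 p hp h, f1 p hp h, f2 p hp h, f3 p hp h, f4 p hp h])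
          (by obtain ⟨w, hw, hin⟩ := List.any_eq_true.mp h5
              fin_cases hw
              · exact Or.inr ⟨("driver", 5), by decide, rfl, hin⟩
              · exact Or.inr ⟨("transport", 5), by decide, rfl, hin⟩
              · exact Or.inr ⟨("taxi", 5), by decide, rfl, hin⟩
              · exact Or.inr ⟨("truck", 5), by decide, rfl, hin⟩
              · rw [f1 ("delivery", 1) (by decide) rfl] at hin
                exact absurd hin (by decide))
        rw [hv]; rfl
      · -- Retired
        have f0 := group_false (PySem.Str.lower occ) _ 0 (Bool.eq_false_iff.mpr h0) (by decide)
        have f1 := group_false (PySem.Str.lower occ) _ 1 (Bool.eq_false_iff.mpr h1) (by decide)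
        have f2 := group_false (PySem.Str.lower occ) _ 2 (Bool.eq_false_iff.mpr h2) (by decide)
        have f3 := group_false (PySem.Str.lower occ) _ 3 (Bool.eq_false_iff.mpr h3) (by decide)
        have f4 := group_false (PySem.Str.lower occ) _ 4 (Bool.eq_false_iff.mpr h4) (by decide)
        have f5 := group_false (PySem.Str.lower occ) _ 5 (Bool.eq_false_iff.mpr h5)
          (by decide)
        have hv := bestRank_eq occ 6 (by omega)
          (by intro p hp hlt
              have : p.2 = 0 ∨ p.2 = 1 ∨ p.2 = 2 ∨ p.2 = 3 ∨ p.2 = 4 ∨ p.2 = 5 := by omega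
              rcases this with h | h | h | h | h | h
              exacts [f0 p hp h, f1 p hp h, f2 p hp h, f3 p hp h, f4 p hp h, f5 p hp h])
          (by obtain ⟨w, hw, hin⟩ := List.any_eq_true.mp h6
              exact Or.inr ⟨(w, 6), by fin_cases hw <;> decide, rfl, hin⟩)
        rw [hv]; rfl
      · -- Student
        have f0 := group_false (PySem.Str.lower occ) _ 0 (Bool.eq_false_iff.mpr h0) (by decide)
        have f1 := group_false (PySem.Str.lower occ) _ 1 (Bool.eq_false_iff.mpr h1) (by decide)
        have f2 := group_false (PySem.Str.lower occ) _ 2 (Bool.eq_false_iff.mpr h2) (by decide)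
        have f3 := group_false (PySem.Str.lower occ) _ 3 (Bool.eq_false_iff.mpr h3) (by decide)
        have f4 := group_false (PySem.Str.lower occ) _ 4 (Bool.eq_false_iff.mpr h4) (by decide)
        have f5 := group_false (PySem.Str.lower occ) _ 5 (Bool.eq_false_iff.mpr h5)
          (by decide)
        have f6 := group_false (PySem.Str.lower occ) _ 6 (Bool.eq_false_iff.mpr h6) (by decide)
        have hv := bestRank_eq occ 7 (by omega)
          (by intro p hp hlt
              have : p.2 = 0 ∨ p.2 = 1 ∨ p.2 = 2 ∨ p.2 = 3 ∨ p.2 = 4 ∨ p.2 = 5 ∨ p.2 = 6 := by omega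
              rcases this with h | h | h | h | h | h | h
              exacts [f0 p hp h, f1 p hp h, f2 p hp h, f3 p hp h, f4 p hp h, f5 p hp h, f6 p hp h])
          (by obtain ⟨w, hw, hin⟩ := List.any_eq_true.mp h7
              exact Or.inr ⟨(w, 7), by fin_cases hw <;> decide, rfl, hin⟩)
        rw [hv]; rfl
      · -- Other profession
        have f0 := group_false (PySem.Str.lower occ) _ 0 (Bool.eq_false_iff.mpr h0) (by decide)
        have f1 := group_false (PySem.Str.lower occ) _ 1 (Bool.eq_false_iff.mpr h1) (by decide)
        have f2 := group_false (PySem.Str.lower occ) _ 2 (Bool.eq_false_iff.mpr h2) (by decide)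
        have f3 := group_false (PySem.Str.lower occ) _ 3 (Bool.eq_false_iff.mpr h3) (by decide)
        have f4 := group_false (PySem.Str.lower occ) _ 4 (Bool.eq_false_iff.mpr h4) (by decide)
        have f5 := group_false (PySem.Str.lower occ) _ 5 (Bool.eq_false_iff.mpr h5)
          (by decide)
        have f6 := group_false (PySem.Str.lower occ) _ 6 (Bool.eq_false_iff.mpr h6) (by decide)
        have f7 := group_false (PySem.Str.lower occ) _ 7 (Bool.eq_false_iff.mpr h7) (by decide)
        have hv := bestRank_eq occ 8 (by omega)
          (by intro p hp hlt
              have : p.2 = 0 ∨ p.2 = 1 ∨ p.2 = 2 ∨ p.2 = 3 ∨ p.2 = 4 ∨ p.2 = 5 ∨ p.2 = 6 ∨ p.2 = 7 := by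
                have hp8 : p.2 ≤ 7 := by fin_cases hp <;> decide
                omega
              rcases this with h | h | h | h | h | h | h | h
              exacts [f0 p hp h, f1 p hp h, f2 p hp h, f3 p hp h, f4 p hp h, f5 p hp h, f6 p hp h, f7 p hp h])
          (Or.inl rfl)
        rw [hv]; rfl
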